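-- pv_equiv track=rewrite | github.com/Crazyop757/RTH_FAFO | skill_engine.py | _build_skill_sources
-- ===== SOURCE A (Python) =====
-- def _build_skill_sources(
--     resume_skills:   list,
--     github_skills:   list,
--     leetcode_skills: list,
-- ) -> dict:
--     """Return a per-skill dict mapping skill → list of source labels."""
--     resume_set   = {s.lower() for s in (resume_skills   or [])}
--     github_set   = {s.lower() for s in (github_skills   or [])}
--     leetcode_set = {s.lower() for s in (leetcode_skills or [])}
--
--     all_skills = resume_set | github_set | leetcode_set
--     sources: dict = {}
--     for skill in all_skills:
--         tags = []
--         if skill in resume_set: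
--             tags.append("resume")
--         if skill in github_set:
--             tags.append("github")
--         if skill in leetcode_set:
--             tags.append("leetcode")
--         sources[skill] = tags
--     return sources
-- ===== SOURCE B (Python) =====
-- def _build_skill_sources(
--     resume_skills:   list,
--     github_skills:   list,
--     leetcode_skills: list,
-- ) -> dict:
--     """Return a per-skill dict mapping skill -> list of source labels."""
--     resume_set   = {s.lower() for s in (resume_skills   or [])}
--     github_set   = {s.lower() for s in (github_skills   or [])}
--     leetcode_set = {s.lower() for s in (leetcode_skills or [])}
--
--     all_skills = resume_set | github_set | leetcode_set
--     sources = {skill: [] for skill in all_skills}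
--     for label, skill_set in (("resume", resume_set),
--                              ("github", github_set),
--                              ("leetcode", leetcode_set)):
--         for skill in skill_set:
--             sources[skill].append(label)
--     return sources
-- ===== Notes on version B (the rewrite author's own statement) =====
-- stated objective: alternative
-- what changed: Gathers labels by scattering: the result dict is pre-seeded with empty lists and then each of the three source sets is iterated once, appending its label to its skills' lists, instead of testing each skill's membership in all three sets.
import Mathlib
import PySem

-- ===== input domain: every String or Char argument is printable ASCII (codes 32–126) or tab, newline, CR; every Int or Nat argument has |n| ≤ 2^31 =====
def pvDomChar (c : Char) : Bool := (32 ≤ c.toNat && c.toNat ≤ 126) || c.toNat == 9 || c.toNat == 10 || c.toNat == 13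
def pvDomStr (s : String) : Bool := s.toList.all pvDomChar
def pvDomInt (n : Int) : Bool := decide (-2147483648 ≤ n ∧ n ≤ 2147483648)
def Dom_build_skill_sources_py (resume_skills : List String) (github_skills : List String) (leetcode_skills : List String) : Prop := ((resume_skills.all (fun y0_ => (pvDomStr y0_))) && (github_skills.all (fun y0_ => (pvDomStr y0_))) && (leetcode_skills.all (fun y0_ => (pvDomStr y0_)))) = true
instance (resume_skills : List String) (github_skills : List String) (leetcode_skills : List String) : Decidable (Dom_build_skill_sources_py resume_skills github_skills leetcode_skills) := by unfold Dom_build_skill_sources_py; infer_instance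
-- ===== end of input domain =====

-- B builds the same dict by scattering: pre-seed every skill with [], then iterate each source set
-- once appending its label — instead of A's per-skill membership tests in all three sets (objective: alternative).
-- The dict is modelled in the deterministic insertion order of the PySem.Set union; Python compares it as a dict.

-- ===== PORT A =====
def build_skill_sources_py (resume_skills : List String) (github_skills : List String) (leetcode_skills : List String) : List (String × List String) :=
  let resume_set : PySem.Set String := PySem.Set.ofList (resume_skills.map PySem.Str.lower)
  let github_set : PySem.Set String := PySem.Set.ofList (github_skills.map PySem.Str.lower)
  let leetcode_set : PySem.Set String := PySem.Set.ofList (leetcode_skills.map PySem.Str.lower)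
  let all_skills : PySem.Set String := PySem.Set.union (PySem.Set.union resume_set github_set) leetcode_set
  let sources : PySem.Dict String (List String) :=
    all_skills.foldl (fun d skill =>
      let tags : List String := []
      let tags := if PySem.Set.contains resume_set skill then tags ++ ["resume"] else tags
      let tags := if PySem.Set.contains github_set skill then tags ++ ["github"] else tags
      let tags := if PySem.Set.contains leetcode_set skill then tags ++ ["leetcode"] else tags
      d.insert skill tags) PySem.Dict.empty
  sources.items

-- ===== PORT B =====
def build_skill_sources_py_alt (resume_skills : List String) (github_skills : List String) (leetcode_skills : List String) : List (String × List String) :=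
  let resume_set : PySem.Set String := PySem.Set.ofList (resume_skills.map PySem.Str.lower)
  let github_set : PySem.Set String := PySem.Set.ofList (github_skills.map PySem.Str.lower)
  let leetcode_set : PySem.Set String := PySem.Set.ofList (leetcode_skills.map PySem.Str.lower)
  let all_skills : PySem.Set String := PySem.Set.union (PySem.Set.union resume_set github_set) leetcode_set
  let sources : PySem.Dict String (List String) :=
    all_skills.foldl (fun d skill => d.insert skill ([] : List String)) PySem.Dict.empty
  let sources :=
    [("resume", resume_set), ("github", github_set), ("leetcode", leetcode_set)].foldl
      (fun d pr => pr.2.foldl (fun d skill => d.modify skill [] (fun t => t ++ [pr.1])) d) sources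
  sources.items

-- ===== PRECONDITION & SPEC =====
def Spec_build_skill_sources_py (resume_skills : List String) (github_skills : List String) (leetcode_skills : List String) (out : List (String × List String)) : Prop := out = build_skill_sources_py_alt resume_skills github_skills leetcode_skills
instance (resume_skills : List String) (github_skills : List String) (leetcode_skills : List String) (out : List (String × List String)) : Decidable (Spec_build_skill_sources_py resume_skills github_skills leetcode_skills out) := by unfold Spec_build_skill_sources_py; infer_instance

-- ===== CLAIM (what is proved, stated in full; the proofs are below) =====
def Claim_equal_build_skill_sources_py : Prop := ∀ (resume_skills : List String) (github_skills : List String) (leetcode_skills : List String), Dom_build_skill_sources_py resume_skills github_skills leetcode_skills → Spec_build_skill_sources_py resume_skills github_skills leetcode_skills (build_skill_sources_py resume_skills github_skills leetcode_skills)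

-- ===== LEMMAS AND PROOFS =====

-- appending one fixed label across a list of keys: the value at c grows by one copy per occurrence
lemma getD_fold_label (lab : String) (l : List String) (d : PySem.Dict String (List String)) (c : String) :
    (l.foldl (fun d s => d.modify s [] (fun t => t ++ [lab])) d).getD c [] =
      d.getD c [] ++ List.replicate (l.count c) lab := by
  induction l generalizing d with
  | nil => simp
  | cons x xs ih =>
      simp only [List.foldl_cons, ih, PySem.Dict.getD_modify, List.count_cons]
      by_cases h : c = x
      · subst h
        simp only [beq_self_eq_true, if_pos, List.append_assoc, List.singleton_append]
        rfl
      · have hxc : ¬ x = c := fun hx => h hx.symm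
        rw [if_neg h]
        simp [hxc]

lemma update_self_of_subset {s : PySem.Set String} {xs : List String}
    (h : ∀ x ∈ xs, x ∈ s) : PySem.Set.update s xs = s := by
  induction xs generalizing s with
  | nil => exact PySem.Set.update_nil s
  | cons x xs ih =>
      rw [PySem.Set.update_cons, PySem.Set.add_of_mem (h x (List.mem_cons_self))]
      exact ih (fun y hy => h y (List.mem_cons_of_mem _ hy))

theorem build_skill_sources_py_spec : Claim_equal_build_skill_sources_py := by
  intro rs gs ls _
  unfold Spec_build_skill_sources_py build_skill_sources_py build_skill_sources_py_alt
  simp only []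
  set r : PySem.Set String := PySem.Set.ofList (rs.map PySem.Str.lower) with hr
  set g : PySem.Set String := PySem.Set.ofList (gs.map PySem.Str.lower) with hg
  set l : PySem.Set String := PySem.Set.ofList (ls.map PySem.Str.lower) with hl
  set all : PySem.Set String := PySem.Set.union (PySem.Set.union r g) l with hall
  have hnd : all.Nodup := by
    exact PySem.Set.nodup_union _ _ (PySem.Set.nodup_union _ _ (PySem.Set.nodup_ofList _))
  have hrnd : r.Nodup := PySem.Set.nodup_ofList _
  have hgnd : g.Nodup := PySem.Set.nodup_ofList _
  have hlnd : l.Nodup := PySem.Set.nodup_ofList _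
  -- A's dict items: one insert per distinct key
  have hA : ∀ (f : String → List String),
      (all.foldl (fun d skill => d.insert skill (f skill)) PySem.Dict.empty).items
        = all.map (fun k => (k, f k)) := by
    intro f
    have := PySem.Dict.items_foldl_insert_fresh (l := all) (k := fun a => a) (v := f)
      (d := PySem.Dict.empty) (by intro a _; simp) (by simpa using hnd)
    simpa using this
  -- B's seeded dict
  have hseed : (all.foldl (fun d skill => d.insert skill ([] : List String)) PySem.Dict.empty).items
      = all.map (fun k => (k, ([] : List String))) := hA _
  set seeded := all.foldl (fun d skill => d.insert skill ([] : List String)) PySem.Dict.empty with hseeddef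
  have hseedkeys : seeded.keys = all := by
    simp only [PySem.Dict.keys, hseed]
    simp [Function.comp_def]
  -- B's final dict after the three scatter loops
  set final := [("resume", r), ("github", g), ("leetcode", l)].foldl
      (fun d pr => pr.2.foldl (fun d skill => d.modify skill [] (fun t => t ++ [pr.1])) d) seeded
    with hfinal
  have hfinal' : final = l.foldl (fun d skill => d.modify skill [] (fun t => t ++ ["leetcode"]))
      (g.foldl (fun d skill => d.modify skill [] (fun t => t ++ ["github"]))
        (r.foldl (fun d skill => d.modify skill [] (fun t => t ++ ["resume"])) seeded)) := by
    simp [hfinal, List.foldl]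
  have hkeys_mod : ∀ (lab : String) (xs : List String) (d : PySem.Dict String (List String)),
      (∀ x ∈ xs, x ∈ d.keys) →
      (xs.foldl (fun d skill => d.modify skill [] (fun t => t ++ [lab])) d).keys = d.keys := by
    intro lab xs d h
    rw [PySem.Dict.keys_foldl_modify]
    exact update_self_of_subset h
  have hsubr : ∀ x ∈ r, x ∈ all := by
    intro x hx; rw [hall]; rw [PySem.Set.mem_union]; left; rw [PySem.Set.mem_union]; left; exact hx
  have hsubg : ∀ x ∈ g, x ∈ all := by
    intro x hx; rw [hall]; rw [PySem.Set.mem_union]; left; rw [PySem.Set.mem_union]; right; exact hx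
  have hsubl : ∀ x ∈ l, x ∈ all := by
    intro x hx; rw [hall]; rw [PySem.Set.mem_union]; right; exact hx
  have hkr := hkeys_mod "resume" r seeded (by intro x hx; rw [hseedkeys]; exact hsubr x hx)
  have hkg := hkeys_mod "github" g _ (by intro x hx; rw [hkr, hseedkeys]; exact hsubg x hx)
  have hkl := hkeys_mod "leetcode" l _ (by intro x hx; rw [hkg, hkr, hseedkeys]; exact hsubl x hx)
  have hfkeys : final.keys = all := by rw [hfinal', hkl, hkg, hkr, hseedkeys]
  have hfnodup : final.keys.Nodup := by rw [hfkeys]; exact hnd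
  -- value of B's final dict at any key of all
  have hseedval : ∀ k ∈ all, seeded.getD k [] = [] := by
    intro k hk
    have hmem : (k, ([] : List String)) ∈ seeded.items := by
      rw [hseed]; exact List.mem_map.mpr ⟨k, hk, rfl⟩
    have hn : seeded.keys.Nodup := by rw [hseedkeys]; exact hnd
    exact PySem.Dict.getD_of_mem_items seeded hmem hn []
  have hrep : ∀ (s : PySem.Set String), s.Nodup → ∀ (k : String) (lab : String),
      List.replicate (s.count k) lab = if PySem.Set.contains s k then [lab] else [] := by
    intro s hs k lab
    by_cases hk : k ∈ s
    · rw [List.count_eq_one_of_mem hs hk]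
      simp [hk]
    · rw [List.count_eq_zero_of_not_mem hk]
      simp [hk]
  have hfval : ∀ k ∈ all, final.getD k [] =
      ((if PySem.Set.contains r k then (["resume"] : List String) else []) ++
        (if PySem.Set.contains g k then ["github"] else []) ++
        (if PySem.Set.contains l k then ["leetcode"] else [])) := by
    intro k hk
    rw [hfinal', getD_fold_label, getD_fold_label, getD_fold_label, hseedval k hk,
      hrep r hrnd k "resume", hrep g hgnd k "github", hrep l hlnd k "leetcode"]
    simp
  -- items of B via keys
  rw [hA, PySem.Dict.items_eq_map_keys final hfnodup ([] : List String), hfkeys]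
  apply List.map_congr_left
  intro k hk
  rw [hfval k hk]
  by_cases h1 : k ∈ r <;>
  by_cases h2 : k ∈ g <;>
  by_cases h3 : k ∈ l <;> simp [h1, h2, h3]
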